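-- pv_equiv track=rewrite | github.com/daniel-reich/ubiquitous-fiesta | WsGjnhMdjsvzyuk5q_11.py | dashed
-- ===== SOURCE A (Python) =====
-- def dashed(txt):
--   ls = []
--   for char in txt:
--     if char.lower() in ['a','e','i','o','u']:
--       ls.append('-'+char+'-')
--     else:
--       ls.append(char)
--   return ''.join(ls)
-- ===== SOURCE B (Python) =====
-- def dashed(txt):
--   # staged whole-string rewriting: one replace pass per vowel (10 passes),
--   # instead of a single per-character scan. Correct because the inserted
--   # dashes and the already-wrapped vowel of one stage are never matched by
--   # a later stage's (different) vowel.
--   for v in 'aeiouAEIOU':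
--     txt = txt.replace(v, '-' + v + '-')
--   return txt
-- ===== Notes on version B (the rewrite author's own statement) =====
-- stated objective: alternative
-- what changed: Replaces the single per-character loop (membership test, list of pieces, join) by ten staged whole-string str.replace passes, one per vowel; correctness rests on later stages never re-matching the output of earlier ones.
import Mathlib
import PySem

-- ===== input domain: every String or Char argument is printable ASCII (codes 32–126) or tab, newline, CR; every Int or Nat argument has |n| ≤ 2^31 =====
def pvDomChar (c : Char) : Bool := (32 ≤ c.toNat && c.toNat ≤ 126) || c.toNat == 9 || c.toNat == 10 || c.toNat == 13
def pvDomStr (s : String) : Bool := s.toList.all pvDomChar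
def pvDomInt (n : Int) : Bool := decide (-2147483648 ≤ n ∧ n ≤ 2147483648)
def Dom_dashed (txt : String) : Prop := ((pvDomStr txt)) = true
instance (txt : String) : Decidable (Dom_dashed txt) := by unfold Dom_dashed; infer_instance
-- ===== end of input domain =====

-- B replaces A's single per-character pass (lowercase membership test, list of pieces, join)
-- by ten staged whole-string replace passes, one per vowel (alternative strategy, same cost).

-- ===== PORT A =====
def dashed (txt : String) : String :=
  let ls : List String := txt.toList.foldl (fun ls c =>
    if PySem.Str.lower (String.ofList [c]) ∈ ["a", "e", "i", "o", "u"] then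
      ls ++ [String.ofList ['-', c, '-']]
    else
      ls ++ [String.ofList [c]]) []
  PySem.Str.join "" ls

-- ===== PORT B =====
-- for v in 'aeiouAEIOU': txt = txt.replace(v, '-' + v + '-')
def dashed_alt (txt : String) : String :=
  "aeiouAEIOU".toList.foldl
    (fun s v => PySem.Str.replace s (String.ofList [v]) (String.ofList ['-', v, '-'])) txt

-- ===== PRECONDITION & SPEC =====
def Spec_dashed (txt : String) (out : String) : Prop := out = dashed_alt txt
instance (txt : String) (out : String) : Decidable (Spec_dashed txt out) := by unfold Spec_dashed; infer_instance

-- ===== CLAIM (what is proved, stated in full; the proofs are below) =====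
def Claim_equal_dashed : Prop := ∀ (txt : String), Dom_dashed txt → Spec_dashed txt (dashed txt)

-- ===== LEMMAS AND PROOFS =====

-- A's piece for one character, as a list of chars
def pieceA (c : Char) : List Char :=
  if PySem.Str.lower (String.ofList [c]) ∈ ["a", "e", "i", "o", "u"] then ['-', c, '-'] else [c]

-- the piece produced by the staged replaces, parameterised by the vowels processed so far
def pieceV (V : List Char) (c : Char) : List Char :=
  if c ∈ V then ['-', c, '-'] else [c]

theorem dashed_foldl (l : List Char) (acc : List String) :
    l.foldl (fun ls c =>
      if PySem.Str.lower (String.ofList [c]) ∈ ["a", "e", "i", "o", "u"] then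
        ls ++ [String.ofList ['-', c, '-']]
      else ls ++ [String.ofList [c]]) acc
    = acc ++ l.map (fun c => String.ofList (pieceA c)) := by
  induction l generalizing acc with
  | nil => simp
  | cons c t ih =>
    rw [List.foldl_cons, ih]
    simp only [pieceA]
    split_ifs with hc <;> simp at hc <;> simp [hc]

theorem join_nil_flatten (xss : List (List Char)) : PySem.Chars.join [] xss = xss.flatten := by
  induction xss with
  | nil => simp [PySem.Chars.join_nil]
  | cons a t ih =>
    cases t with
    | nil => simp [PySem.Chars.join_singleton]
    | cons b t' => simp [PySem.Chars.join_cons_cons, ih]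

-- replacing a single character is a flatMap
theorem replace_go_single (v : Char) (new : List Char) (l : List Char) :
    ∀ (fuel : Nat) (acc : List Char), l.length ≤ fuel →
    PySem.Chars.replace.go [v] new fuel l acc
      = acc.reverse ++ l.flatMap (fun c => if c = v then new else [c]) := by
  induction l with
  | nil =>
    intro fuel acc _
    cases fuel <;> simp [PySem.Chars.replace.go]
  | cons c t ih =>
    intro fuel acc h
    cases fuel with
    | zero => simp at h
    | succ fuel =>
      rw [PySem.Chars.replace.go]
      have hpre : List.isPrefixOf [v] (c :: t) = (v == c) := by
        simp [List.isPrefixOf]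
      rw [hpre]
      by_cases hvc : v = c
      · subst hvc
        simp only [beq_self_eq_true, if_true, List.length_cons, List.length_nil,
          List.drop_succ_cons, List.drop_zero]
        rw [ih fuel (new.reverse ++ acc) (by simpa using h)]
        simp [List.flatMap_cons]
      · rw [if_neg (by simp [hvc])]
        rw [ih fuel (c :: acc) (by simpa using h)]
        simp [List.flatMap_cons, Ne.symm hvc]

theorem replace_single (l : List Char) (v : Char) (new : List Char) :
    PySem.Chars.replace l [v] new = l.flatMap (fun c => if c = v then new else [c]) := by
  rw [PySem.Chars.replace]
  simp only [List.isEmpty_cons]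
  rw [if_neg (by simp)]
  simpa using replace_go_single v new l l.length [] le_rfl

-- the staged replaces compute a single flatMap of pieceV
theorem foldl_replace_chars (V : List Char) (cs : List Char)
    (hnd : V.Nodup) (hd : '-' ∉ V) :
    V.foldl (fun s v => PySem.Chars.replace s [v] ['-', v, '-']) cs
      = cs.flatMap (pieceV V) := by
  induction V generalizing cs with
  | nil =>
    have hp : pieceV [] = fun c => [c] := by funext c; simp [pieceV]
    simp [hp]
  | cons v V ih =>
    rw [List.foldl_cons,
        ih _ (List.nodup_cons.mp hnd).2 (fun h => hd (List.mem_cons_of_mem _ h)),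
        replace_single, List.flatMap_assoc]
    apply List.flatMap_congr
    intro c _
    by_cases hc : c = v
    · subst hc
      have hcv : c ∉ V := (List.nodup_cons.mp hnd).1
      have hdd : '-' ∉ V := fun h => hd (List.mem_cons_of_mem _ h)
      simp [pieceV, hcv, hdd]
    · simp only [if_neg hc]
      simp [pieceV, List.mem_cons, hc]

set_option maxRecDepth 4000 in
theorem pieceA_eq_pieceV (c : Char) (h : pvDomChar c = true) :
    pieceA c = pieceV "aeiouAEIOU".toList c := by
  have h127 : c.toNat < 127 := by
    simp only [pvDomChar, Bool.or_eq_true, Bool.and_eq_true, decide_eq_true_eq, beq_iff_eq] at h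
    omega
  have key : ∀ n : Fin 127,
      pieceA (Char.ofNat n.val) = pieceV "aeiouAEIOU".toList (Char.ofNat n.val) := by decide
  have := key ⟨c.toNat, h127⟩
  simpa using this

-- bridge the String-level fold of B to the Chars-level fold
theorem dashed_alt_toList (V : List Char) (s : String) :
    (V.foldl (fun s v => PySem.Str.replace s (String.ofList [v]) (String.ofList ['-', v, '-'])) s).toList
      = V.foldl (fun cs v => PySem.Chars.replace cs [v] ['-', v, '-']) s.toList := by
  induction V generalizing s with
  | nil => rfl
  | cons v V ih =>
    rw [List.foldl_cons, List.foldl_cons, ih]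
    simp [PySem.Str.toList_replace]

-- ===== VERDICT (by name: the statement is the Claim_ definition above) =====
theorem dashed_spec : Claim_equal_dashed := by
  intro txt hdom
  unfold Spec_dashed dashed dashed_alt
  rw [dashed_foldl, List.nil_append]
  apply String.toList_inj.mp
  rw [dashed_alt_toList, foldl_replace_chars _ _ (by decide) (by decide)]
  simp only [PySem.Str.toList_join, List.map_map]
  have hmap : List.map (String.toList ∘ fun c => String.ofList (pieceA c)) txt.toList
      = List.map pieceA txt.toList := by
    simp [Function.comp]
  rw [hmap, String.toList_ofList, join_nil_flatten, ← List.flatMap_def]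
  apply List.flatMap_congr
  intro c hc
  exact pieceA_eq_pieceV c (by exact List.all_eq_true.mp hdom c hc)
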